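-- pv_equiv track=rewrite | github.com/rambaaral/JBNU_PPP_2024 | hw/hw11/hw11_02.py | max_rain
-- ===== SOURCE A (Python) =====
-- def max_rain(wlist):
--     rain_event = []
--
--     prev_rain_count = 0
--     prev_rain = 0
--     for rain in wlist:
--         if rain == 0:
--             if prev_rain_count > 0:
--                 rain_event.append(prev_rain)
--             prev_rain_count = 0
--             prev_rain = 0
--         else:
--             prev_rain_count += 1
--             prev_rain += rain
--     return max(rain_event)
-- ===== SOURCE B (Python) =====
-- def max_rain(wlist):
--     # Chop the list at each first zero: sum the prefix before it (if nonempty)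
--     # as one closed rain event, then continue after the zero.  A trailing run
--     # with no closing zero never reaches a zero, so it is never recorded,
--     # matching A.  max([]) raises ValueError exactly where A does.
--     segments = []
--     rest = wlist
--     while 0 in rest:
--         k = rest.index(0)
--         if k > 0:
--             segments.append(sum(rest[:k]))
--         rest = rest[k + 1:]
--     return max(segments)
-- ===== Notes on version B (the rewrite author's own statement) =====
-- stated objective: alternative
-- what changed: B replaces A's element-by-element accumulator loop (running count/sum reset at zeros) by repeatedly chopping the list at its first zero with index() and slices, summing each closed prefix; max of an empty segment list raises ValueError on the same inputs as A.
import Mathlib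
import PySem

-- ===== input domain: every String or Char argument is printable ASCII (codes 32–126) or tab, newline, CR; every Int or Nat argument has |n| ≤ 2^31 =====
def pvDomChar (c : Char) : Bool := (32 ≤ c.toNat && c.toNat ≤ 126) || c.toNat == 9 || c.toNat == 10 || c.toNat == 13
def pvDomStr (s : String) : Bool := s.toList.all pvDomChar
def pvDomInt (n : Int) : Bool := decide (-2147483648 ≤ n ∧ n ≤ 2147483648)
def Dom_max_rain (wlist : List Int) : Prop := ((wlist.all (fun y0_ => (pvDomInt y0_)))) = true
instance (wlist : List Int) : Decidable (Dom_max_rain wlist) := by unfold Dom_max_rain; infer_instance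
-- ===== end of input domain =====

-- B chops the list at each first zero (index + slices) instead of A's element-by-element
-- accumulator loop; same cost, different decomposition ('alternative').

-- ===== PORT A =====
-- A's for-loop over wlist with state (rain_event, prev_rain_count, prev_rain);
-- max(rain_event) raises ValueError on an empty list — those inputs are outside Pre_,
-- the port returns 0 there.
def max_rain (wlist : List Int) : Int :=
  (PySem.List.max?
    (wlist.foldl (fun (st : List Int × Int × Int) rain =>
      if rain = 0 then
        (if st.2.1 > 0 then st.1 ++ [st.2.2] else st.1, 0, 0)
      else
        (st.1, st.2.1 + 1, st.2.2 + rain)) ([], 0, 0)).1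
    (fun y => y)).getD 0

-- ===== PORT B =====
-- while 0 in rest: k = rest.index(0); record sum(rest[:k]) if k > 0; rest = rest[k+1:]
def maxRainChop (rest : List Int) : List Int :=
  if _h : (0 : Int) ∈ rest then
    -- rest.index(0): guarded by the membership test, so index? is some; getD 0 is never the default
    let k := (PySem.List.index? rest 0).getD 0
    (if k > 0 then [(PySem.List.slice rest none (some (k : Int))).sum] else []) ++
    maxRainChop (PySem.List.slice rest (some ((k : Int) + 1)) none)
  else []
termination_by rest.length
decreasing_by
  have : ((k : Int) + 1) = ((k + 1 : Nat) : Int) := by push_cast; ring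
  rw [this, PySem.List.slice_from_natCast]
  have hne : rest ≠ [] := by rintro rfl; simp at _h
  have := List.length_pos_iff.mpr hne
  simp [List.length_drop]; omega

-- max(segments): ValueError on empty — outside Pre_, the port returns 0 there.
def max_rain_alt (wlist : List Int) : Int :=
  (PySem.List.max? (maxRainChop wlist) (fun y => y)).getD 0

-- ===== PRECONDITION & SPEC =====
-- A raises ValueError (max of an empty list) unless some nonzero run is closed by a
-- later zero, i.e. unless a zero occurs after the leading zeros; Pre_ is exactly that.
def Pre_max_rain (wlist : List Int) : Prop :=
  (0 : Int) ∈ wlist.dropWhile (fun x => x == 0)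
instance (wlist : List Int) : Decidable (Pre_max_rain wlist) := by unfold Pre_max_rain; infer_instance

def pvWitness_max_rain : List Int := ([1, 2, 0, 5, 0, 3])

def Spec_max_rain (wlist : List Int) (out : Int) : Prop := out = max_rain_alt wlist
instance (wlist : List Int) (out : Int) : Decidable (Spec_max_rain wlist out) := by unfold Spec_max_rain; infer_instance

-- ===== CLAIM (what is proved, stated in full; the proofs are below) =====
def Claim_equal_max_rain : Prop := ∀ (wlist : List Int), Dom_max_rain wlist → Pre_max_rain wlist → Spec_max_rain wlist (max_rain wlist)

-- ===== LEMMAS AND PROOFS =====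

-- the event list A's loop produces, as a structural recursion (acc = prev_rain, cnt = prev_rain_count)
def fA : List Int → Int → Int → List Int
  | [], _, _ => []
  | r :: t, acc, cnt =>
    if r = 0 then (if cnt > 0 then [acc] else []) ++ fA t 0 0
    else fA t (acc + r) (cnt + 1)

theorem foldl_fA (l : List Int) : ∀ (ev : List Int) (cnt pv : Int),
    (l.foldl (fun (st : List Int × Int × Int) rain =>
      if rain = 0 then
        (if st.2.1 > 0 then st.1 ++ [st.2.2] else st.1, 0, 0)
      else
        (st.1, st.2.1 + 1, st.2.2 + rain)) (ev, cnt, pv)).1 = ev ++ fA l pv cnt := by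
  induction l with
  | nil => intro ev cnt pv; simp [fA]
  | cons r t ih =>
    intro ev cnt pv
    by_cases hr : r = 0
    · subst hr
      by_cases hc : cnt > 0 <;> simp [List.foldl_cons, fA, hc, ih]
    · simp [List.foldl_cons, fA, hr, ih]

theorem fA_no_zero : ∀ (l : List Int) (acc cnt : Int), (0 : Int) ∉ l → fA l acc cnt = [] := by
  intro l
  induction l with
  | nil => intro acc cnt _; rfl
  | cons r t ih =>
    intro acc cnt h
    have hr : r ≠ 0 := fun hr => h (hr ▸ List.mem_cons_self)
    simp [fA, hr]
    exact ih _ _ (fun ht => h (List.mem_cons_of_mem _ ht))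

theorem fA_split : ∀ (pre suf : List Int) (acc cnt : Int), (0 : Int) ∉ pre →
    fA (pre ++ 0 :: suf) acc cnt
      = (if cnt + pre.length > 0 then [acc + pre.sum] else []) ++ fA suf 0 0 := by
  intro pre
  induction pre with
  | nil => intro suf acc cnt _; simp [fA]
  | cons p t ih =>
    intro suf acc cnt h
    have hp : p ≠ 0 := fun hp => h (hp ▸ List.mem_cons_self)
    have ht : (0 : Int) ∉ t := fun hm => h (List.mem_cons_of_mem _ hm)
    simp only [List.cons_append, fA, if_neg hp, ih suf (acc + p) (cnt + 1) ht]
    have hcond : (cnt + 1 + (t.length : Int) > 0) ↔ (cnt + ((p :: t).length : Int) > 0) := by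
      simp; omega
    by_cases hc : cnt + 1 + (t.length : Int) > 0
    · rw [if_pos hc, if_pos (hcond.mp hc)]
      simp [add_assoc]
    · rw [if_neg hc, if_neg (fun hx => hc (hcond.mpr hx))]

theorem chop_eq_fA : ∀ (n : ℕ) (l : List Int), l.length ≤ n → maxRainChop l = fA l 0 0 := by
  intro n
  induction n with
  | zero =>
    intro l hl
    have : l = [] := List.eq_nil_of_length_eq_zero (Nat.le_zero.mp hl)
    subst this; simp [maxRainChop, fA]
  | succ n ih =>
    intro l hl
    by_cases hm : (0 : Int) ∈ l
    · have hsome : ∃ k, PySem.List.index? l 0 = some k := by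
        rcases Option.isSome_iff_exists.mp ((PySem.List.index?_isSome_iff l 0).mpr hm) with ⟨k, hk⟩
        exact ⟨k, hk⟩
      rcases hsome with ⟨k, hk⟩
      rw [maxRainChop, dif_pos hm]
      simp only [hk]
      change (if k > 0 then [(PySem.List.slice l none (some (k : Int))).sum] else []) ++
        maxRainChop (PySem.List.slice l (some ((k : Int) + 1)) none) = fA l 0 0
      rcases (PySem.List.index?_eq_some_iff l 0 k).mp hk with ⟨pre, suf, hl2, hlen, hnz⟩
      have hslice1 : PySem.List.slice l none (some (k : Int)) = pre := by
        rw [PySem.List.slice_to_natCast, hl2, ← hlen]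
        simp
      have hslice2 : PySem.List.slice l (some ((k : Int) + 1)) none = suf := by
        have : ((k : Int) + 1) = ((k + 1 : Nat) : Int) := by push_cast; ring
        rw [this, PySem.List.slice_from_natCast, hl2, ← hlen]
        simp [List.drop_append]
      have hlsuf : suf.length ≤ n := by
        have := hl2 ▸ hl
        simp [List.length_append] at this
        omega
      rw [hslice1, hslice2, ih suf hlsuf, hl2, fA_split pre suf 0 0 hnz]
      have hcond : ((0 : Int) + (pre.length : Int) > 0) ↔ k > 0 := by
        rw [← hlen]; omega
      by_cases hkpos : k > 0
      · rw [if_pos hkpos, if_pos (hcond.mpr hkpos)]; simp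
      · rw [if_neg hkpos, if_neg (fun hx => hkpos (hcond.mp hx))]
    · rw [maxRainChop, dif_neg hm, fA_no_zero l 0 0 hm]

theorem ports_eq (wlist : List Int) : max_rain wlist = max_rain_alt wlist := by
  unfold max_rain max_rain_alt
  rw [foldl_fA, chop_eq_fA wlist.length wlist (le_refl _)]
  simp

-- ===== VERDICT (by name: the statement is the Claim_ definition above) =====
theorem max_rain_spec : Claim_equal_max_rain := by
  intro wlist _ _
  exact ports_eq wlist
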